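-- pv_equiv track=rewrite | github.com/psymonryan/agent13 | ui/tui.py | _offset_to_location
-- ===== SOURCE A (Python) =====
-- def _offset_to_location(text: str, offset: int) -> tuple[int, int]:
--     """Convert character offset to (row, col) location.
--
--     Args:
--         text: The full text content
--         offset: Character offset from start of text
--
--     Returns:
--         Tuple of (row, col)
--     """
--     lines = text.split("\n")
--     current_offset = 0
--     for row, line in enumerate(lines):
--         if current_offset + len(line) >= offset:
--             return (row, offset - current_offset)
--         current_offset += len(line) + 1  # +1 for newline
--     # If offset is at or past end of text
--     return (len(lines) - 1, len(lines[-1]))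
-- ===== SOURCE B (Python) =====
-- def _offset_to_location(text: str, offset: int) -> tuple[int, int]:
--     """Convert character offset to (row, col) via a line-start table and binary search."""
--     lines = text.split("\n")
--     starts = []
--     cur = 0
--     for line in lines:
--         starts.append(cur)
--         cur += len(line) + 1
--     ends = [starts[k] + len(lines[k]) for k in range(len(lines))]
--     # binary search: first row whose line-end offset is >= offset
--     lo, hi = 0, len(ends)
--     while lo < hi:
--         mid = (lo + hi) // 2
--         if ends[mid] < offset:
--             lo = mid + 1
--         else:
--             hi = mid
--     if lo < len(lines):
--         return (lo, offset - starts[lo])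
--     return (len(lines) - 1, len(lines[-1]))
-- ===== Notes on version B (the rewrite author's own statement) =====
-- stated objective: alternative
-- what changed: Replaces A's linear accumulate-and-compare scan over the lines with a precomputed table of line-start offsets and a hand-written bisect_left binary search over line-end offsets to find the target row.
import Mathlib
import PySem

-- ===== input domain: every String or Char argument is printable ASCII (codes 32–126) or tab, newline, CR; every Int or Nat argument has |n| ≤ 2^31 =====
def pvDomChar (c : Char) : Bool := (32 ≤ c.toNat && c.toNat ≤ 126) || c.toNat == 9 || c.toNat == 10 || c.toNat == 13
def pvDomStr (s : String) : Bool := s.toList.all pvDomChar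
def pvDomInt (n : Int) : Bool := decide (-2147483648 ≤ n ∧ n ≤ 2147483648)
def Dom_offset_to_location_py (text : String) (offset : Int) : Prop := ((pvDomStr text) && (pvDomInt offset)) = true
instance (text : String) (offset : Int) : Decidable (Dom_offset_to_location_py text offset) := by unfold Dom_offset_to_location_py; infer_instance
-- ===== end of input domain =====

-- B replaces A's linear accumulate-and-compare scan by a precomputed line-start table plus a
-- binary search over line-end offsets (alternative decomposition; same observable results).

-- ===== PORT A =====
-- the for-loop of A: row/current_offset accumulators; `some` = the in-loop return, `none` = fall through
def pvALoop : List String → Int → Int → Int → Option (Int × Int)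
  | [], _, _, _ => none
  | line :: rest, row, cur, off =>
    if off ≤ cur + PySem.Str.len line then some (row, off - cur)
    else pvALoop rest (row + 1) (cur + PySem.Str.len line + 1) off

def offset_to_location_py (text : String) (offset : Int) : Int × Int :=
  let lines := (PySem.Str.split? text "\n").getD []   -- sep "\n" ≠ "" so split? never raises
  match pvALoop lines 0 0 offset with
  | some rc => rc
  | none => ((lines.length : Int) - 1, PySem.Str.len ((PySem.List.pyGet? lines (-1)).getD ""))

-- ===== PORT B =====
-- the starts-building loop of B (append + running cur)
def pvStarts : List String → Int → List Int
  | [], _ => []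
  | line :: rest, cur => cur :: pvStarts rest (cur + PySem.Str.len line + 1)

-- B's hand-written bisect_left loop: first index in [lo, hi) whose end offset is ≥ off
def pvBisect (ends : List Int) (off : Int) (lo hi : Nat) : Nat :=
  if h : lo < hi then
    let mid := (lo + hi) / 2
    if ends.getD mid 0 < off then pvBisect ends off (mid + 1) hi
    else pvBisect ends off lo mid
  else lo
termination_by hi - lo
decreasing_by all_goals omega

def offset_to_location_py_alt (text : String) (offset : Int) : Int × Int :=
  let lines := (PySem.Str.split? text "\n").getD []   -- sep "\n" ≠ "" so split? never raises
  let starts := pvStarts lines 0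
  let ends := (List.range lines.length).map
      (fun k => starts.getD k 0 + PySem.Str.len (lines.getD k ""))
  let lo := pvBisect ends offset 0 ends.length
  if lo < lines.length then ((lo : Int), offset - starts.getD lo 0)
  else ((lines.length : Int) - 1, PySem.Str.len ((PySem.List.pyGet? lines (-1)).getD ""))

-- ===== PRECONDITION & SPEC =====
def Spec_offset_to_location_py (text : String) (offset : Int) (out : Int × Int) : Prop := out = offset_to_location_py_alt text offset
instance (text : String) (offset : Int) (out : Int × Int) : Decidable (Spec_offset_to_location_py text offset out) := by unfold Spec_offset_to_location_py; infer_instance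

-- ===== CLAIM (what is proved, stated in full; the proofs are below) =====
def Claim_equal_offset_to_location_py : Prop := ∀ (text : String) (offset : Int), Dom_offset_to_location_py text offset → Spec_offset_to_location_py text offset (offset_to_location_py text offset)

-- ===== LEMMAS AND PROOFS =====

-- end offset of line k (start of line k plus its length), the quantity both programs compare with `offset`
def pvEnd (lines : List String) (k : Nat) : Int :=
  (pvStarts lines 0).getD k 0 + PySem.Str.len (lines.getD k "")

theorem pvStr_len_nonneg (s : String) : 0 ≤ PySem.Str.len s := by
  simp [PySem.Str.len_eq]

theorem pvStarts_getD_succ (ls : List String) (c : Int) (k : Nat) (hk : k + 1 < ls.length) :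
    (pvStarts ls c).getD (k + 1) 0 =
      (pvStarts ls c).getD k 0 + PySem.Str.len (ls.getD k "") + 1 := by
  induction ls generalizing c k with
  | nil => simp at hk
  | cons l t ih =>
    cases k with
    | zero =>
      cases t with
      | nil => simp at hk
      | cons l' t' => simp [pvStarts]
    | succ k' =>
      have hk' : k' + 1 < t.length := by simpa using hk
      simpa [pvStarts] using ih (c + PySem.Str.len l + 1) k' hk'

theorem pvEnd_mono (lines : List String) (j j' : Nat) (hle : j ≤ j') (hj' : j' < lines.length) :
    pvEnd lines j ≤ pvEnd lines j' := by
  induction j' with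
  | zero =>
    have : j = 0 := by omega
    simp [this]
  | succ m ih =>
    rcases Nat.lt_or_ge j (m + 1) with h | h
    · have h1 : pvEnd lines j ≤ pvEnd lines m := ih (by omega) (by omega)
      have h2 : pvEnd lines m ≤ pvEnd lines (m + 1) := by
        unfold pvEnd
        rw [pvStarts_getD_succ lines 0 m hj']
        have := pvStr_len_nonneg (lines.getD (m + 1) "")
        have := pvStr_len_nonneg (lines.getD m "")
        omega
      exact h1.trans h2
    · have : j = m + 1 := by omega
      simp [this]

theorem pvBisect_spec (E : List Int) (off : Int)
    (mono : ∀ j j', j ≤ j' → j' < E.length → E.getD j 0 ≤ E.getD j' 0) :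
    ∀ d lo hi, hi - lo ≤ d → lo ≤ hi → hi ≤ E.length →
      (∀ j, j < lo → E.getD j 0 < off) →
      (∀ j, hi ≤ j → j < E.length → off ≤ E.getD j 0) →
      pvBisect E off lo hi ≤ E.length ∧
        (∀ j, j < pvBisect E off lo hi → E.getD j 0 < off) ∧
        (∀ j, pvBisect E off lo hi ≤ j → j < E.length → off ≤ E.getD j 0) := by
  intro d
  induction d with
  | zero =>
    intro lo hi hd hlh hhE h1 h2
    have : lo = hi := by omega
    subst this
    rw [pvBisect]
    simp only [lt_irrefl, dite_false]
    exact ⟨by omega, h1, h2⟩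
  | succ d ih =>
    intro lo hi hd hlh hhE h1 h2
    rw [pvBisect]
    by_cases h : lo < hi
    · simp only [h, dite_true]
      by_cases hc : E.getD ((lo + hi) / 2) 0 < off
      · simp only [hc, if_true]
        refine ih ((lo + hi) / 2 + 1) hi (by omega) (by omega) hhE ?_ h2
        intro j hj
        rcases Nat.lt_or_ge j ((lo + hi) / 2 + 1) with _ | _
        · exact lt_of_le_of_lt (mono j ((lo + hi) / 2) (by omega) (by omega)) hc
        · omega
      · simp only [hc, if_false]
        refine ih lo ((lo + hi) / 2) (by omega) (by omega) (by omega) h1 ?_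
        intro j hj hjE
        exact le_trans (not_lt.mp hc) (mono ((lo + hi) / 2) j hj hjE)
    · simp only [h, dite_false]
      have : lo = hi := by omega
      exact ⟨by omega, h1, fun j hj hjE => h2 j (by omega) hjE⟩

theorem pvStarts_getD_zero (ls : List String) : (pvStarts ls 0).getD 0 0 = 0 := by
  cases ls <;> simp [pvStarts]

theorem pvALoop_char (lines : List String) (off : Int) :
    ∀ (ls : List String) (k : Nat), ls = lines.drop k → k ≤ lines.length →
    ∃ r, k ≤ r ∧ r ≤ lines.length ∧
      (∀ j, k ≤ j → j < r → pvEnd lines j < off) ∧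
      (r < lines.length → off ≤ pvEnd lines r) ∧
      pvALoop ls (k : Int) ((pvStarts lines 0).getD k 0) off =
        if r < lines.length then some ((r : Int), off - (pvStarts lines 0).getD r 0) else none := by
  intro ls
  induction ls with
  | nil =>
    intro k hdrop hk
    have hkn : k = lines.length := by
      have := congrArg List.length hdrop
      simp [List.length_drop] at this
      omega
    refine ⟨lines.length, by omega, le_refl _, by omega, by omega, ?_⟩
    simp [pvALoop]
  | cons line rest ih =>
    intro k hdrop hk
    have hkl : k < lines.length := by
      by_contra hc
      rw [List.drop_eq_nil_of_le (by omega)] at hdrop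
      simp at hdrop
    have hline : lines.getD k "" = line := by
      have h0 : lines[k]? = some line := by
        have : (lines.drop k)[0]? = some line := by rw [← hdrop]; rfl
        rwa [List.getElem?_drop, Nat.add_zero] at this
      simp [List.getD, h0]
    have hrest : rest = lines.drop (k + 1) := by
      have h1 : (lines.drop k).tail = lines.drop (k + 1) := List.tail_drop
      rw [← hdrop] at h1
      simpa using h1
    by_cases hc : off ≤ (pvStarts lines 0).getD k 0 + PySem.Str.len line
    · refine ⟨k, le_refl _, by omega, by omega, ?_, ?_⟩
      · intro _; unfold pvEnd; rw [hline]; exact hc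
      · simp only [pvALoop]
        rw [if_pos hc, if_pos hkl]
    · have hstep : pvALoop (line :: rest) (k : Int) ((pvStarts lines 0).getD k 0) off =
          pvALoop rest ((k : Int) + 1) ((pvStarts lines 0).getD k 0 + PySem.Str.len line + 1) off := by
        simp only [pvALoop]
        rw [if_neg hc]
      rcases Nat.lt_or_ge (k + 1) lines.length with hk1 | hk1
      · obtain ⟨r, hr1, hr2, hr3, hr4, hr5⟩ := ih (k + 1) hrest (by omega)
        refine ⟨r, by omega, hr2, ?_, hr4, ?_⟩
        · intro j hj1 hj2
          rcases Nat.lt_or_ge j (k + 1) with h | h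
          · have hjk : j = k := by omega
            subst hjk
            unfold pvEnd; rw [hline]; exact not_le.mp hc
          · exact hr3 j h hj2
        · rw [hstep, ← hr5, pvStarts_getD_succ lines 0 k hk1, hline]
          norm_cast
      · have hrnil : rest = [] := by
          rw [hrest, List.drop_eq_nil_of_le (by omega)]
        refine ⟨lines.length, by omega, le_refl _, ?_, by omega, ?_⟩
        · intro j hj1 hj2
          have hjk : j = k := by omega
          subst hjk
          unfold pvEnd; rw [hline]; exact not_le.mp hc
        · rw [hstep, hrnil]
          simp [pvALoop]

-- the two cores agree for EVERY list of lines (so in particular for text.split("\n"))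
theorem pvCore_eq (lines : List String) (offset : Int) (E : List Int)
    (hE : E = (List.range lines.length).map
        (fun k => (pvStarts lines 0).getD k 0 + PySem.Str.len (lines.getD k ""))) :
    (match pvALoop lines 0 0 offset with
      | some rc => rc
      | none => ((lines.length : Int) - 1, PySem.Str.len ((PySem.List.pyGet? lines (-1)).getD ""))) =
    (if pvBisect E offset 0 E.length < lines.length
      then ((pvBisect E offset 0 E.length : Int),
            offset - (pvStarts lines 0).getD (pvBisect E offset 0 E.length) 0)
      else ((lines.length : Int) - 1, PySem.Str.len ((PySem.List.pyGet? lines (-1)).getD ""))) := by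
  obtain ⟨r, hr0, hrn, hrlt, hrge, hrun⟩ :=
    pvALoop_char lines offset lines 0 (by simp) (Nat.zero_le _)
  rw [pvStarts_getD_zero, Nat.cast_zero] at hrun
  have hElen : E.length = lines.length := by simp [hE]
  have hEget : ∀ j, j < lines.length → E.getD j 0 = pvEnd lines j := by
    intro j hj
    rw [hE, PySem.List.getD_map_range _ _ _ _ hj]; rfl
  have mono : ∀ j j', j ≤ j' → j' < E.length → E.getD j 0 ≤ E.getD j' 0 := by
    intro j j' hle hj'
    rw [hElen] at hj'
    rw [hEget j (by omega), hEget j' hj']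
    exact pvEnd_mono lines j j' hle hj'
  obtain ⟨hb1, hb2, hb3⟩ :=
    pvBisect_spec E offset mono E.length 0 E.length (by omega) (Nat.zero_le _) (le_refl _)
      (by omega) (by omega)
  set lo := pvBisect E offset 0 E.length with hlo
  have hreq : r = lo := by
    rcases lt_trichotomy r lo with h | h | h
    · exfalso
      have h1 : E.getD r 0 < offset := hb2 r h
      have h2 : offset ≤ pvEnd lines r := hrge (by omega)
      rw [hEget r (by omega)] at h1; omega
    · exact h
    · exfalso
      have h1 : pvEnd lines lo < offset := hrlt lo (Nat.zero_le _) h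
      have h2 : offset ≤ E.getD lo 0 := hb3 lo (le_refl _) (by omega)
      rw [hEget lo (by omega)] at h2; omega
  rw [hrun]
  by_cases hrl : r < lines.length
  · rw [if_pos hrl, if_pos (hreq ▸ hrl), ← hreq]
  · rw [if_neg hrl, if_neg (hreq ▸ hrl)]

-- ===== VERDICT (by name: the statement is the Claim_ definition above) =====
theorem offset_to_location_py_spec : Claim_equal_offset_to_location_py := by
  intro text offset _
  unfold Spec_offset_to_location_py offset_to_location_py offset_to_location_py_alt
  exact pvCore_eq ((PySem.Str.split? text "\n").getD []) offset _ rfl
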